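-- pv_equiv track=rewrite | github.com/AmidamaruPWNZ/DotaDragonChessBot | Autoplay.py | check_consecutive_n
-- ===== SOURCE A (Python) =====
-- def check_consecutive_n(line, n):
--     """Проверяет, есть ли n подряд True в списке."""
--     count = 0
--     for value in line:
--         if value:
--             count += 1
--             if count >= n:
--                 return True
--         else:
--             count = 0
--     return False
-- ===== SOURCE B (Python) =====
-- from itertools import groupby
--
--
-- def check_consecutive_n(line, n):
--     """Проверяет, есть ли n подряд True в списке."""
--     runs = [(k, sum(1 for _ in g)) for k, g in groupby(line, key=bool)]
--     return any(k and c >= n for k, c in runs)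
-- ===== Notes on version B (the rewrite author's own statement) =====
-- stated objective: alternative
-- what changed: Replaces the running counter with reset/early return by partitioning the list into maximal runs of equal truthiness (itertools.groupby) and testing whether some truthy run has length >= n.
import Mathlib
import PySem

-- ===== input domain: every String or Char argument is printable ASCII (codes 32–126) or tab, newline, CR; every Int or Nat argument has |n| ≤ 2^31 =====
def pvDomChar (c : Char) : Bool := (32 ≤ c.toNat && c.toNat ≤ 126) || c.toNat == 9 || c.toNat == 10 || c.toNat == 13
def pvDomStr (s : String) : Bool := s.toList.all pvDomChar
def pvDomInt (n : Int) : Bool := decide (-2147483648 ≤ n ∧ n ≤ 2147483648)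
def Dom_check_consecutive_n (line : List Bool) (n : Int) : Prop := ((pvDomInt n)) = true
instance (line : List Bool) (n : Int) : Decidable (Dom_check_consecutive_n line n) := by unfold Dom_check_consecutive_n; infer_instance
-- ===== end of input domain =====

-- B replaces A's running counter with a run-partitioning (groupby) pass; objective: alternative.

-- ===== PORT A =====
-- the for-loop with early return, carrying the running count
def check_consecutive_n_go (n : Int) : List Bool → Int → Bool
  | [], _ => false
  | v :: rest, count =>
    if v then
      if count + 1 ≥ n then true else check_consecutive_n_go n rest (count + 1)
    else check_consecutive_n_go n rest 0

def check_consecutive_n (line : List Bool) (n : Int) : Bool :=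
  check_consecutive_n_go n line 0

-- ===== PORT B =====
-- itertools.groupby(line, key=bool) with each group's length: the list of maximal runs (value, length)
def pvRunsCCN : List Bool → List (Bool × Int)
  | [] => []
  | v :: rest =>
    match pvRunsCCN rest with
    | (k, c) :: more => if k = v then (k, c + 1) :: more else (v, 1) :: (k, c) :: more
    | [] => [(v, 1)]

def check_consecutive_n_alt (line : List Bool) (n : Int) : Bool :=
  (pvRunsCCN line).any (fun p => p.1 && decide (p.2 ≥ n))

-- ===== PRECONDITION & SPEC =====
def Spec_check_consecutive_n (line : List Bool) (n : Int) (out : Bool) : Prop := out = check_consecutive_n_alt line n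
instance (line : List Bool) (n : Int) (out : Bool) : Decidable (Spec_check_consecutive_n line n out) := by unfold Spec_check_consecutive_n; infer_instance

-- ===== CLAIM (what is proved, stated in full; the proofs are below) =====
def Claim_equal_check_consecutive_n : Prop := ∀ (line : List Bool) (n : Int), Dom_check_consecutive_n line n → Spec_check_consecutive_n line n (check_consecutive_n line n)

-- ===== LEMMAS AND PROOFS =====

-- proof helper: the run check with the first run, if truthy, extended by the carried count c
def ccnHd (n c : Int) : List (Bool × Int) → Bool
  | (true, m) :: rest => decide (c + m ≥ n) || rest.any (fun p => p.1 && decide (p.2 ≥ n))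
  | r => r.any (fun p => p.1 && decide (p.2 ≥ n))

-- every run produced by pvRunsCCN has positive length
theorem pvRunsCCN_pos : ∀ (l : List Bool), ∀ p ∈ pvRunsCCN l, 1 ≤ p.2 := by
  intro l
  induction l with
  | nil => intro p hp; simp [pvRunsCCN] at hp
  | cons v rest ih =>
    intro p hp
    simp only [pvRunsCCN] at hp
    cases hr : pvRunsCCN rest with
    | nil => rw [hr] at hp; simp at hp; simp [hp]
    | cons q more =>
      obtain ⟨k, c⟩ := q
      rw [hr] at hp
      by_cases hk : k = v
      · simp only [hk, if_pos rfl] at hp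
        rcases List.mem_cons.mp hp with hp | hp
        · have := ih (v, c) (by rw [hr, hk]; exact List.mem_cons_self)
          simp only at this; simp [hp]; omega
        · exact ih p (by rw [hr]; exact List.mem_cons_of_mem _ hp)
      · simp only [if_neg hk] at hp
        rcases List.mem_cons.mp hp with hp | hp
        · simp [hp]
        · exact ih p (by rw [hr]; exact hp)

-- the loop with carried count equals the run check with the first truthy run extended by count
theorem ccn_go_runs (n : Int) : ∀ (l : List Bool) (c : Int),
    check_consecutive_n_go n l c = ccnHd n c (pvRunsCCN l) := by
  intro l
  induction l with
  | nil => intro c; simp [check_consecutive_n_go, pvRunsCCN, ccnHd]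
  | cons v rest ih =>
    intro c
    simp only [check_consecutive_n_go, pvRunsCCN]
    cases hr : pvRunsCCN rest with
    | nil =>
      cases v with
      | true =>
        simp only [if_pos rfl, ih (c + 1), hr, ccnHd, List.any_nil]
        by_cases h1 : c + 1 ≥ n <;> simp [h1]
      | false =>
        simp only [Bool.false_eq_true, if_false, ih 0, hr, ccnHd]
        simp
    | cons q more =>
      obtain ⟨k, c₀⟩ := q
      have hpos : 1 ≤ c₀ := by
        have := pvRunsCCN_pos rest (k, c₀) (by rw [hr]; exact List.mem_cons_self); simpa using this
      cases v with
      | true =>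
        cases k with
        | true =>
          -- the first run of rest is truthy: the new element merges into it
          simp only [if_pos rfl, ih (c + 1), hr, ccnHd]
          by_cases h1 : c + 1 ≥ n
          · have h2 : (decide (c + (c₀ + 1) ≥ n) : Bool) = true := by
              simp only [decide_eq_true_eq]; omega
            simp [h1, h2]
          · have h2 : (decide (c + 1 + c₀ ≥ n) : Bool) = decide (c + (c₀ + 1) ≥ n) := by
              simp only [decide_eq_decide]; omega
            simp [h1, h2]
        | false =>
          -- the first run of rest is falsy: a new truthy run of length 1
          simp only [if_pos rfl, Bool.false_eq_true, if_false, ih (c + 1), hr, ccnHd,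
            List.any_cons, Bool.false_and, Bool.false_or]
          by_cases h1 : c + 1 ≥ n <;> simp [h1]
      | false =>
        simp only [Bool.false_eq_true, if_false, ih 0, hr]
        cases k <;> simp [ccnHd]

-- ===== VERDICT (by name: the statement is the Claim_ definition above) =====
theorem check_consecutive_n_spec : Claim_equal_check_consecutive_n := by
  intro line n _
  unfold Spec_check_consecutive_n check_consecutive_n check_consecutive_n_alt
  rw [ccn_go_runs]
  cases hr : pvRunsCCN line with
  | nil => simp [ccnHd]
  | cons q more =>
    obtain ⟨k, m⟩ := q
    cases k <;> simp [ccnHd]
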